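-- pv_equiv track=rewrite | github.com/OblackmonIII/15-418-Final-Project | inputGenerator.py | createNonsatClauses
-- ===== SOURCE A (Python) =====
-- def createNonsatClauses(numVariables, numClauses):
-- 	clausesText = ""
-- 	# get 1 .... numVariables as a list []
-- 	variableList = list(range(1, numVariables + 1))
-- 	# new line of text for each clause
-- 	currNumOfClauses = 0
-- 	# defaults and makes it 3 literals per clause (3-SAT)
-- 	numVarsInCurrClause = 3
-- 	while(currNumOfClauses < numClauses):
-- 		for currVars in range(0, len(variableList)):
-- 			# create a permutation of size 2^3 = 8 with all possible assignments to ensure that its not satisfiable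
-- 			currentVariable = variableList[currVars]
-- 			nextVariable = variableList[currVars + 1]
-- 			nextNextVariable = variableList[currVars + 2]
-- 			clausesText += str(currentVariable) + " " + str(nextVariable) + " " + str(nextNextVariable) + "\n"
-- 			currNumOfClauses += 1
-- 			if(currNumOfClauses >= numClauses):
-- 				return clausesText
-- 			negatedCurrentVariable = currentVariable * -1
-- 			negatedNextVariable = nextVariable * -1
-- 			negatedNextNextVariable = nextNextVariable * -1
--
-- 			clausesText += str(negatedCurrentVariable) + " " + str(nextVariable) + " " + str(nextNextVariable) + "\n"
-- 			currNumOfClauses += 1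
-- 			if(currNumOfClauses >= numClauses):
-- 				return clausesText
--
-- 			clausesText += str(currentVariable) + " " + str(negatedNextVariable) + " " + str(nextNextVariable) + "\n"
-- 			currNumOfClauses += 1
-- 			if(currNumOfClauses >= numClauses):
-- 				return clausesText
--
-- 			clausesText += str(negatedCurrentVariable) + " " + str(negatedNextVariable) + " " + str(negatedNextNextVariable) + "\n"
-- 			currNumOfClauses += 1
-- 			if(currNumOfClauses >= numClauses):
-- 				return clausesText
-- 	return clausesText
-- ===== SOURCE B (Python) =====
-- def createNonsatClauses(numVariables, numClauses):
--     # Closed form: clause k (0-based) is variant k%4 of window k//4 + 1, so each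
--     # line is computed independently from its index -- no loop state, no early returns.
--     def line(k):
--         a, v = divmod(k, 4)
--         a += 1
--         b, c = a + 1, a + 2
--         return "%d %d %d\n" % (-a if v % 2 else a, -b if v >= 2 else b, -c if v == 3 else c)
--     return "".join(line(k) for k in range(numClauses))
-- ===== Notes on version B (the rewrite author's own statement) =====
-- stated objective: simpler
-- what changed: Replaces A's stateful nested while/for with list indexing and four inline early-return checks by a closed-form formula: clause k is variant k%4 of window k//4+1, so B just maps an index->line function over range(numClauses) and joins, with no loop state, no variable list and no early returns.
import Mathlib
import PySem

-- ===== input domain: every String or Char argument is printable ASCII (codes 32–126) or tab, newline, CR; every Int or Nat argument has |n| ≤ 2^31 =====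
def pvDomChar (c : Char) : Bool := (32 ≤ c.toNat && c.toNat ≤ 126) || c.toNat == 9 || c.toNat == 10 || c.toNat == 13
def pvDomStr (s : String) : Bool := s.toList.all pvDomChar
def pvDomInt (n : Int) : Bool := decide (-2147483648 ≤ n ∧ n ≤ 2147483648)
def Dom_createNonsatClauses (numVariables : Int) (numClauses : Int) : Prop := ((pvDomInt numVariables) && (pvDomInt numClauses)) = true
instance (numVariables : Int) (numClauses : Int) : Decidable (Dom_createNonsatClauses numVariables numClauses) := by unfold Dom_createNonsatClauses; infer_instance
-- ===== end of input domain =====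

-- B replaces A's stateful nested loops (list indexing, four early returns) by a closed-form
-- index->line formula (clause k = variant k%4 of window k//4+1) mapped over range(numClauses)
-- and joined once (objective: simpler).

-- ===== PORT A =====
-- str(x) + " " + str(y) + " " + str(z) + "\n"
def pvClauseA (x y z : Int) : String :=
  PySem.Int.toStr x ++ " " ++ PySem.Int.toStr y ++ " " ++ PySem.Int.toStr z ++ "\n"

-- the inner `for currVars in range(0, len(variableList))` loop; Bool = true means `return`
-- (also used where Python raises IndexError — those inputs are outside Pre_)
def pvForA (vl : List Int) (numClauses : Int) : Nat → Nat → String → Int → String × Int × Bool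
  | 0, _, text, cnt => (text, cnt, false)
  | rem+1, currVars, text, cnt =>
    match PySem.List.pyGet? vl (currVars : Int), PySem.List.pyGet? vl ((currVars : Int) + 1),
          PySem.List.pyGet? vl ((currVars : Int) + 2) with
    | some cv, some nv, some nnv =>
      let t1 := text ++ pvClauseA cv nv nnv
      let c1 := cnt + 1
      if numClauses ≤ c1 then (t1, c1, true) else
      let t2 := t1 ++ pvClauseA (-cv) nv nnv
      let c2 := c1 + 1
      if numClauses ≤ c2 then (t2, c2, true) else
      let t3 := t2 ++ pvClauseA cv (-nv) nnv
      let c3 := c2 + 1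
      if numClauses ≤ c3 then (t3, c3, true) else
      let t4 := t3 ++ pvClauseA (-cv) (-nv) (-nnv)
      let c4 := c3 + 1
      if numClauses ≤ c4 then (t4, c4, true) else
      pvForA vl numClauses rem (currVars + 1) t4 c4
    | _, _, _ => (text, cnt, true)

-- the outer `while(currNumOfClauses < numClauses)` loop; under Pre_ one fuel unit is enough
-- (the for body either returns or, outside Pre_, raises/diverges)
def pvWhileA (vl : List Int) (numClauses : Int) : Nat → String → Int → String
  | 0, text, _ => text
  | fuel+1, text, cnt =>
    if cnt < numClauses then
      match pvForA vl numClauses vl.length 0 text cnt with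
      | (t, _, true) => t
      | (t, c, false) => pvWhileA vl numClauses fuel t c
    else text

def createNonsatClauses (numVariables : Int) (numClauses : Int) : String :=
  let variableList := PySem.List.pyRange 1 (numVariables + 1) 1
  pvWhileA variableList numClauses (numClauses.toNat + 1) "" 0

-- ===== PORT B =====
-- the inner `line(k)` function: a, v = divmod(k, 4); a += 1; b, c = a+1, a+2
def pvLineB (k : Int) : String :=
  let a := PySem.Int.floordiv k 4 + 1
  let v := PySem.Int.mod k 4
  let b := a + 1
  let c := a + 2
  PySem.Int.toStr (if PySem.Int.mod v 2 ≠ 0 then -a else a) ++ " " ++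
  PySem.Int.toStr (if 2 ≤ v then -b else b) ++ " " ++
  PySem.Int.toStr (if v = 3 then -c else c) ++ "\n"

-- "".join(line(k) for k in range(numClauses))
def createNonsatClauses_alt (numVariables : Int) (numClauses : Int) : String :=
  PySem.Str.join "" ((PySem.List.pyRange 0 numClauses 1).map pvLineB)

-- ===== PRECONDITION & SPEC =====
-- Pre_ is exactly the set of inputs on which A returns: otherwise A raises IndexError
-- (numVariables ≥ 1 and more clauses requested than the 4*(numVariables-2) windows give)
-- or loops forever (numVariables ≤ 0 with numClauses ≥ 1).
def Pre_createNonsatClauses (numVariables : Int) (numClauses : Int) : Prop :=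
  numClauses ≤ 0 ∨ (3 ≤ numVariables ∧ numClauses ≤ 4 * (numVariables - 2))
instance (numVariables : Int) (numClauses : Int) : Decidable (Pre_createNonsatClauses numVariables numClauses) := by unfold Pre_createNonsatClauses; infer_instance
def pvWitness_createNonsatClauses : Int × Int := (5, 5)

def Spec_createNonsatClauses (numVariables : Int) (numClauses : Int) (out : String) : Prop := out = createNonsatClauses_alt numVariables numClauses
instance (numVariables : Int) (numClauses : Int) (out : String) : Decidable (Spec_createNonsatClauses numVariables numClauses out) := by unfold Spec_createNonsatClauses; infer_instance

-- ===== CLAIM (what is proved, stated in full; the proofs are below) =====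
def Claim_equal_createNonsatClauses : Prop := ∀ (numVariables : Int) (numClauses : Int), Dom_createNonsatClauses numVariables numClauses → Pre_createNonsatClauses numVariables numClauses → Spec_createNonsatClauses numVariables numClauses (createNonsatClauses numVariables numClauses)
-- ===== LEMMAS AND PROOFS =====

-- the 4-clause block of window a, and the first m lines of the stream of blocks from window a
def pvL (a : Int) : List String :=
  [pvClauseA a (a+1) (a+2), pvClauseA (-a) (a+1) (a+2),
   pvClauseA a (-(a+1)) (a+2), pvClauseA (-a) (-(a+1)) (-(a+2))]

def pvS (a : Int) (m : Nat) : List String :=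
  if m ≤ 4 then (pvL a).take m else pvL a ++ pvS (a+1) (m-4)
termination_by m
decreasing_by omega

theorem pv_join_nil : PySem.Str.join "" [] = "" := by decide

theorem pv_join_cons (s : String) (l : List String) :
    PySem.Str.join "" (s :: l) = s ++ PySem.Str.join "" l := by
  apply String.toList_inj.mp
  simp [PySem.Chars.join, List.intercalate]
  cases l <;> simp

theorem pv_join_append (l1 l2 : List String) :
    PySem.Str.join "" (l1 ++ l2) = PySem.Str.join "" l1 ++ PySem.Str.join "" l2 := by
  induction l1 with
  | nil => simp [pv_join_nil]
  | cons s t ih => simp [pv_join_cons, ih, String.append_assoc]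

-- divmod arithmetic: floordiv (4a+v) 4 = a and mod (4a+v) 4 = v for 0 ≤ v < 4
theorem pv_floordiv_block (a v : Int) (h0 : 0 ≤ v) (h4 : v < 4) :
    PySem.Int.floordiv (4 * a + v) 4 = a := by
  rw [PySem.Int.floordiv_eq_iff_of_pos (by omega : (0:Int) < 4)]
  omega

theorem pv_mod_block (a v : Int) (h0 : 0 ≤ v) (h4 : v < 4) :
    PySem.Int.mod (4 * a + v) 4 = v := by
  have h := PySem.Int.floordiv_mul_add_mod (4 * a + v) 4
  rw [pv_floordiv_block a v h0 h4] at h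
  omega

-- the four lines of window a+1, by the closed form
theorem pvLineB_block (a : Int) :
    [pvLineB (4*a), pvLineB (4*a+1), pvLineB (4*a+2), pvLineB (4*a+3)] = pvL (a+1) := by
  have e0 : (4*a : Int) = 4*a + 0 := by ring
  have h0 := pv_mod_block a 0 (by omega) (by omega)
  have h1 := pv_mod_block a 1 (by omega) (by omega)
  have h2 := pv_mod_block a 2 (by omega) (by omega)
  have h3 := pv_mod_block a 3 (by omega) (by omega)
  have d0 := pv_floordiv_block a 0 (by omega) (by omega)
  have d1 := pv_floordiv_block a 1 (by omega) (by omega)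
  have d2 := pv_floordiv_block a 2 (by omega) (by omega)
  have d3 := pv_floordiv_block a 3 (by omega) (by omega)
  rw [e0] at *
  simp only [pvLineB, pvL, pvClauseA, h0, h1, h2, h3, d0, d1, d2, d3]
  norm_num

-- the closed-form map over a range equals the sequential block stream
theorem pv_map_range (m : Nat) : ∀ a : Int,
    (PySem.List.pyRange (4*a) (4*a + m) 1).map pvLineB = pvS (a+1) m := by
  induction m using Nat.strong_induction_on with
  | _ m ih =>
    intro a
    by_cases h4 : m ≤ 4
    · interval_cases m <;>
        simp [PySem.List.pyRange_one, List.range_succ, pvS, pvL] <;>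
        have hb := pvLineB_block a <;>
        simp only [pvL] at hb <;>
        simp_all [show (4*a+1+1 : Int) = 4*a+2 from by ring,
          show (4*a+1+1+1 : Int) = 4*a+3 from by ring, and_assoc]
    · rw [PySem.List.pyRange_one_append (4*a) (4*a+4) (4*a+m) (by omega) (by push_cast; omega)]
      rw [List.map_append]
      have hfirst : (PySem.List.pyRange (4*a) (4*a+4) 1).map pvLineB = pvL (a+1) := by
        rw [show (4*a+4 : Int) = (4*a) + (4:Nat) from by push_cast; ring]
        simpa [PySem.List.pyRange_one, List.range_succ,
          show (4*a+1+1 : Int) = 4*a+2 from by ring,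
          show (4*a+1+1+1 : Int) = 4*a+3 from by ring] using
          congrArg id (pvLineB_block a)
      have hrest : (PySem.List.pyRange (4*a+4) (4*a+m) 1).map pvLineB = pvS (a+2) (m-4) := by
        have := ih (m-4) (by omega) (a+1)
        rw [show (4*(a+1) : Int) = 4*a+4 from by ring,
          show (4*a+4 + ((m-4 : Nat) : Int) : Int) = 4*a+m from by push_cast; omega,
          show (a+1+1 : Int) = a+2 from by ring] at this
        exact this
      rw [hfirst, hrest,
        show pvS (a+1) m = pvL (a+1) ++ pvS (a+1+1) (m-4) from by rw [pvS, if_neg h4],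
        show (a+1+1 : Int) = a+2 from by ring]

-- B's output is the join of the first numClauses lines of the stream
theorem pv_alt_eq (nv nc : Int) (h : 0 ≤ nc) :
    createNonsatClauses_alt nv nc = PySem.Str.join "" (pvS 1 nc.toNat) := by
  unfold createNonsatClauses_alt
  have := pv_map_range nc.toNat 0
  rw [show (4*(0:Int) : Int) = 0 from by ring, show ((0:Int)+1 : Int) = 1 from by ring,
    show ((0:Int) + (nc.toNat : Int) : Int) = nc from by omega] at this
  rw [this]

theorem pv_forA_spec (vl : List Int) (nc : Int)
    (hget : ∀ j : Nat, j < vl.length → PySem.List.pyGet? vl (j : Int) = some ((j : Int) + 1)) :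
    ∀ (rem idx : Nat) (text : String) (cnt : Int),
      idx + rem = vl.length → cnt < nc → nc - cnt ≤ 4 * ((vl.length : Int) - 2 - idx) →
      pvForA vl nc rem idx text cnt =
        (text ++ PySem.Str.join "" (pvS ((idx : Int) + 1) (nc - cnt).toNat), nc, true) := by
  intro rem
  induction rem with
  | zero => intro idx text cnt h1 h2 h3; exfalso; omega
  | succ rem ih =>
    intro idx text cnt h1 h2 h3
    have e1 : ((idx : Int) + 1) + 1 = (idx : Int) + 2 := by ring
    have e2 : ((idx : Int) + 1) + 2 = (idx : Int) + 3 := by ring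
    have hg0 := hget idx (by omega)
    have hg1 : PySem.List.pyGet? vl ((idx : Int) + 1) = some ((idx : Int) + 2) := by
      have h := hget (idx + 1) (by omega); push_cast at h; rw [h]; congr 1
    have hg2 : PySem.List.pyGet? vl ((idx : Int) + 2) = some ((idx : Int) + 3) := by
      have h := hget (idx + 2) (by omega); push_cast at h; rw [h]; congr 1
    rw [pvForA, hg0, hg1, hg2]
    simp only []
    split_ifs with hc1 hc2 hc3 hc4
    · have hm : (nc - cnt).toNat = 1 := by omega
      rw [hm, pvS, if_pos (by omega)]
      simp only [pvL, List.take_succ_cons, List.take_zero, pv_join_cons, pv_join_nil,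
        Prod.mk.injEq, pvClauseA, e1, e2, and_true]
      exact ⟨by simp [String.append_assoc], by omega⟩
    · have hm : (nc - cnt).toNat = 2 := by omega
      rw [hm, pvS, if_pos (by omega)]
      simp only [pvL, List.take_succ_cons, List.take_zero, pv_join_cons, pv_join_nil,
        Prod.mk.injEq, pvClauseA, e1, e2, and_true]
      exact ⟨by simp [String.append_assoc], by omega⟩
    · have hm : (nc - cnt).toNat = 3 := by omega
      rw [hm, pvS, if_pos (by omega)]
      simp only [pvL, List.take_succ_cons, List.take_zero, pv_join_cons, pv_join_nil,
        Prod.mk.injEq, pvClauseA, e1, e2, and_true]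
      exact ⟨by simp [String.append_assoc], by omega⟩
    · have hm : (nc - cnt).toNat = 4 := by omega
      rw [hm, pvS, if_pos (by omega)]
      simp only [pvL, List.take_succ_cons, List.take_zero, pv_join_cons, pv_join_nil,
        Prod.mk.injEq, pvClauseA, e1, e2, and_true]
      exact ⟨by simp [String.append_assoc], by omega⟩
    · have hrec := ih (idx+1) (text ++ pvClauseA ((idx:Int)+1) ((idx:Int)+2) ((idx:Int)+3)
        ++ pvClauseA (-((idx:Int)+1)) ((idx:Int)+2) ((idx:Int)+3)
        ++ pvClauseA ((idx:Int)+1) (-((idx:Int)+2)) ((idx:Int)+3)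
        ++ pvClauseA (-((idx:Int)+1)) (-((idx:Int)+2)) (-((idx:Int)+3)))
        (cnt+4) (by omega) (by omega) (by push_cast; omega)
      push_cast at hrec
      rw [show cnt + 1 + 1 + 1 + 1 = cnt + 4 from by ring, hrec]
      have hS : pvS ((idx:Int)+1) (nc - cnt).toNat
          = pvL ((idx:Int)+1) ++ pvS ((idx:Int)+1+1) ((nc - cnt).toNat - 4) := by
        rw [pvS, if_neg (by omega)]
      rw [hS, pv_join_append, show (nc - cnt).toNat - 4 = (nc - (cnt + 4)).toNat from by omega]
      simp only [pvL, pvClauseA, e1, e2, pv_join_cons, pv_join_nil, Prod.mk.injEq,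
        and_true]
      simp [String.append_assoc]

-- ===== VERDICT (by name: the statement is the Claim_ definition above) =====
theorem createNonsatClauses_spec : Claim_equal_createNonsatClauses := by
  intro nv nc _ hpre
  unfold Spec_createNonsatClauses
  by_cases hnc : nc ≤ 0
  · rw [createNonsatClauses_alt, PySem.List.pyRange_one_eq_nil (by omega)]
    show pvWhileA _ nc (nc.toNat + 1) "" 0 = _
    rw [pvWhileA, if_neg (by omega)]
    simp [pv_join_nil]
  · rcases hpre with h | ⟨h3, h4⟩
    · omega
    show pvWhileA (PySem.List.pyRange 1 (nv + 1) 1) nc (nc.toNat + 1) "" 0 = _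
    have hlen : (PySem.List.pyRange 1 (nv + 1) 1).length = nv.toNat := by
      rw [PySem.List.length_pyRange_one]; congr 1; omega
    have hlenz : (((PySem.List.pyRange 1 (nv + 1) 1).length : Nat) : Int) = nv := by
      rw [hlen]; omega
    have hget : ∀ j : Nat, j < (PySem.List.pyRange 1 (nv + 1) 1).length →
        PySem.List.pyGet? (PySem.List.pyRange 1 (nv + 1) 1) (j : Int) = some ((j : Int) + 1) := by
      intro j hj
      rw [PySem.List.pyGet?_natCast, List.getElem?_eq_getElem hj,
        PySem.List.getElem_pyRange_one]
      congr 1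
      omega
    rw [pvWhileA, if_pos (by omega)]
    rw [pv_forA_spec (PySem.List.pyRange 1 (nv + 1) 1) nc hget
      (PySem.List.pyRange 1 (nv + 1) 1).length 0 "" 0 (by omega) (by omega)
      (by rw [hlenz]; push_cast; omega)]
    rw [pv_alt_eq nv nc (by omega)]
    simp
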